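-- pv_equiv track=rewrite | github.com/TiagoSD22/Sistemas-de-Lindenmayer | Figuras.py | IdentificarTermos
-- ===== SOURCE A (Python) =====
-- def IdentificarTermos(regras):
--     saida = regras[0]
--     i = 0
--     while(i < len(regras)):
--         while(i < len(regras)and regras[i] != ';'):
--             i+=1
--         i+=1
--         while(i < len(regras) and (not regras[i].isalpha())):
--             i+=1
--         if(i < len(regras)):
--             saida = saida + regras[i]
--         i+=1
--     return saida
-- ===== SOURCE B (Python) =====
-- def IdentificarTermos(regras):
--     saida = regras[0]
--     for part in regras.split(';')[1:]:
--         for ch in part: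
--             if ch.isalpha():
--                 saida += ch
--                 break
--     return saida
-- ===== Notes on version B (the rewrite author's own statement) =====
-- stated objective: simpler
-- what changed: Replaced the shared-index nested-while state machine with a split-on-separator decomposition: B builds the segment list once and appends each segment's first alphabetic character, which coincides with A because A's non-alpha skip crossing separators exactly skips alpha-free segments.
import Mathlib
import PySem

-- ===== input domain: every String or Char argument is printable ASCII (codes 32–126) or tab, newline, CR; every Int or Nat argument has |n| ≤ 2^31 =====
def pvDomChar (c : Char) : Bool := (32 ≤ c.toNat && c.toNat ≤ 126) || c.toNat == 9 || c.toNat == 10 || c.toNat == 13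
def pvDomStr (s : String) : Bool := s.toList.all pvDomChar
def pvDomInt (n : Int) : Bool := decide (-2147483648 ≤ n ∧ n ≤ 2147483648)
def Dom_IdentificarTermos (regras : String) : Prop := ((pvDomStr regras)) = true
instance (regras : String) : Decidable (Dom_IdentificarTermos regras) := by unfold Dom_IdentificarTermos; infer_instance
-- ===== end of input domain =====

-- B replaces A's shared-index nested-while scan by split(';') + first-alpha per segment (simpler decomposition; a timing run measured B faster by a constant factor).

-- ===== PORT A =====
-- termination helper for the suffix-based transcription of A's index loops
theorem pv_dropWhile_len {p : Char → Bool} {l r : List Char} {c : Char}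
    (h : l.dropWhile p = c :: r) : r.length < l.length := by
  have h1 : (c :: r).length ≤ l.length := by rw [← h]; exact l.length_dropWhile_le p
  exact Nat.lt_of_lt_of_le (Nat.lt_succ_self r.length) (by simpa using h1)

-- A's while loops, transcribed with the scan position i represented as the suffix regras[i:]:
-- pvASeek = the outer iteration starting at the first inner while (skip to ';'),
-- pvATake = the state just after 'i += 1' past a ';' (skip non-alpha — possibly crossing later ';' —, emit, continue).
mutual
def pvASeek (l : List Char) : List Char :=
  match h : l.dropWhile (fun c => !(c == ';')) with
  | [] => []
  | _ :: r => pvATake r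
termination_by l.length
decreasing_by exact pv_dropWhile_len h

def pvATake (m : List Char) : List Char :=
  match h : m.dropWhile (fun c => !(PySem.Chars.isalpha c)) with
  | [] => []
  | c :: r => c :: pvASeek r
termination_by m.length
decreasing_by exact pv_dropWhile_len h
end

def IdentificarTermos (regras : String) : String :=
  match regras.toList with
  | [] => ""   -- Python raises IndexError on regras[0]; excluded by Pre_
  | c :: _ => String.ofList (c :: pvASeek regras.toList)

-- ===== PORT B =====
-- hand port of regras.split(';') (single-character separator): exact — Python's split on a
-- 1-char sep yields the maximal ';'-free pieces, with '' pieces between adjacent separators.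
def pvSplitSemi (l : List Char) : List (List Char) :=
  match h : l.dropWhile (fun c => !(c == ';')) with
  | [] => [l.takeWhile (fun c => !(c == ';'))]
  | _ :: r => l.takeWhile (fun c => !(c == ';')) :: pvSplitSemi r
termination_by l.length
decreasing_by exact pv_dropWhile_len h

-- the inner 'for ch in part: if ch.isalpha(): … break' = first alpha of the segment
def pvFirstAlpha (seg : List Char) : List Char :=
  match seg.find? PySem.Chars.isalpha with
  | some a => [a]
  | none => []

def IdentificarTermos_alt (regras : String) : String :=
  match regras.toList with
  | [] => ""   -- regras[0] raises here too; excluded by Pre_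
  | c :: _ =>
    String.ofList (c :: ((pvSplitSemi regras.toList).tail.foldl (fun acc seg => acc ++ pvFirstAlpha seg) []))

-- ===== PRECONDITION & SPEC =====
-- Pre_ excludes only the empty string, on which Python A raises IndexError (regras[0]).
def Pre_IdentificarTermos (regras : String) : Prop := regras ≠ ""
instance (regras : String) : Decidable (Pre_IdentificarTermos regras) := by unfold Pre_IdentificarTermos; infer_instance
def pvWitness_IdentificarTermos : String := "F;F->F-F;X->yX"

def Spec_IdentificarTermos (regras : String) (out : String) : Prop := out = IdentificarTermos_alt regras
instance (regras : String) (out : String) : Decidable (Spec_IdentificarTermos regras out) := by unfold Spec_IdentificarTermos; infer_instance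

-- ===== CLAIM (what is proved, stated in full; the proofs are below) =====
def Claim_equal_IdentificarTermos : Prop := ∀ (regras : String), Dom_IdentificarTermos regras → Pre_IdentificarTermos regras → Spec_IdentificarTermos regras (IdentificarTermos regras)

-- ===== LEMMAS AND PROOFS =====

def pvFlatFa (segs : List (List Char)) : List Char := segs.flatMap pvFirstAlpha

theorem pvSplitSemi_ne_nil (l : List Char) : pvSplitSemi l ≠ [] := by
  unfold pvSplitSemi
  split <;> simp

-- unfolding equations with a plain (non-dependent) match
theorem pvASeek_eq (l : List Char) :
    pvASeek l = match l.dropWhile (fun c => !(c == ';')) with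
      | [] => [] | _ :: r => pvATake r := by
  rw [pvASeek]
  split <;> rename_i heq <;> simp [heq]

theorem pvATake_eq (m : List Char) :
    pvATake m = match m.dropWhile (fun c => !(PySem.Chars.isalpha c)) with
      | [] => [] | c :: r => c :: pvASeek r := by
  rw [pvATake]
  split <;> rename_i heq <;> simp [heq]

theorem pvSplitSemi_eq (l : List Char) :
    pvSplitSemi l = match l.dropWhile (fun c => !(c == ';')) with
      | [] => [l.takeWhile (fun c => !(c == ';'))]
      | _ :: r => l.takeWhile (fun c => !(c == ';')) :: pvSplitSemi r := by
  rw [pvSplitSemi]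
  split <;> rename_i heq <;> simp [heq]

-- step equations
theorem pvASeek_nil : pvASeek [] = [] := by rw [pvASeek_eq]; rfl

theorem pvATake_nil : pvATake [] = [] := by rw [pvATake_eq]; rfl

theorem pvASeek_cons (c : Char) (t : List Char) :
    pvASeek (c :: t) = if c = ';' then pvATake t else pvASeek t := by
  by_cases hc : c = ';'
  · subst hc; rw [pvASeek_eq]; simp [List.dropWhile_cons]
  · rw [pvASeek_eq, pvASeek_eq t]; simp [List.dropWhile_cons, hc]

theorem pvATake_cons (c : Char) (t : List Char) :
    pvATake (c :: t) = if PySem.Chars.isalpha c then c :: pvASeek t else pvATake t := by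
  by_cases ha : PySem.Chars.isalpha c
  · rw [pvATake_eq]; simp [List.dropWhile_cons, ha]
  · rw [pvATake_eq, pvATake_eq t]; simp [List.dropWhile_cons, ha]

theorem pvSplitSemi_nil : pvSplitSemi [] = [[]] := by rw [pvSplitSemi_eq]; rfl

theorem pvSplitSemi_cons_semi (t : List Char) :
    pvSplitSemi (';' :: t) = [] :: pvSplitSemi t := by
  rw [pvSplitSemi_eq]
  simp [List.dropWhile_cons, List.takeWhile_cons, ← pvSplitSemi_eq]

theorem pvSplitSemi_cons_ne (c : Char) (t : List Char) (hc : ¬ c = ';') :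
    pvSplitSemi (c :: t) = (c :: (pvSplitSemi t).headD []) :: (pvSplitSemi t).tail := by
  rw [pvSplitSemi_eq, pvSplitSemi_eq t]
  cases h : t.dropWhile (fun c => !(c == ';')) with
  | nil => simp [List.dropWhile_cons, List.takeWhile_cons, hc, h]
  | cons x r => simp [List.dropWhile_cons, List.takeWhile_cons, hc, h]

theorem pvSplitSemi_recomb (t : List Char) :
    pvSplitSemi t = (pvSplitSemi t).headD [] :: (pvSplitSemi t).tail := by
  cases h : pvSplitSemi t with
  | nil => exact absurd h (pvSplitSemi_ne_nil t)
  | cons s ss => simp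

theorem pv_isalpha_semi : PySem.Chars.isalpha ';' = false := by decide

-- main invariant: A's scan equals B's per-segment first-alpha collection
theorem pv_main (m : List Char) :
    pvATake m = pvFlatFa (pvSplitSemi m) ∧ pvASeek m = pvFlatFa (pvSplitSemi m).tail := by
  induction m with
  | nil =>
    constructor
    · simp [pvATake_nil, pvSplitSemi_nil, pvFlatFa, pvFirstAlpha]
    · simp [pvASeek_nil, pvSplitSemi_nil, pvFlatFa]
  | cons c t ih =>
    obtain ⟨hP, hQ⟩ := ih
    by_cases hc : c = ';'
    · subst hc
      constructor
      · rw [pvATake_cons, pv_isalpha_semi, pvSplitSemi_cons_semi]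
        simpa [pvFlatFa, pvFirstAlpha] using hP
      · rw [pvASeek_cons, pvSplitSemi_cons_semi]
        simpa using hP
    · have hsplit := pvSplitSemi_cons_ne c t hc
      by_cases ha : PySem.Chars.isalpha c
      · constructor
        · rw [pvATake_cons, if_pos ha, hsplit]
          simp only [pvFlatFa, List.flatMap_cons, pvFirstAlpha, List.find?_cons, ha]
          simpa using hQ
        · rw [pvASeek_cons, if_neg hc, hsplit]
          simpa using hQ
      · have hfa : pvFirstAlpha (c :: (pvSplitSemi t).headD []) = pvFirstAlpha ((pvSplitSemi t).headD []) := by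
          simp [pvFirstAlpha, List.find?_cons, ha]
        constructor
        · rw [pvATake_cons, if_neg ha, hsplit]
          have : pvFlatFa ((c :: (pvSplitSemi t).headD []) :: (pvSplitSemi t).tail)
              = pvFlatFa ((pvSplitSemi t).headD [] :: (pvSplitSemi t).tail) := by
            simp only [pvFlatFa, List.flatMap_cons, hfa]
          rw [this, ← pvSplitSemi_recomb]
          exact hP
        · rw [pvASeek_cons, if_neg hc, hsplit]
          simpa using hQ

theorem pv_foldl_fa (segs : List (List Char)) (init : List Char) :
    segs.foldl (fun acc seg => acc ++ pvFirstAlpha seg) init = init ++ pvFlatFa segs := by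
  induction segs generalizing init with
  | nil => simp [pvFlatFa]
  | cons s ss ih => rw [List.foldl_cons, ih]; simp [pvFlatFa, List.append_assoc]

-- ===== VERDICT (by name: the statement is the Claim_ definition above) =====
theorem IdentificarTermos_spec : Claim_equal_IdentificarTermos := by
  intro regras _ _
  unfold Spec_IdentificarTermos IdentificarTermos IdentificarTermos_alt
  cases h : regras.toList with
  | nil => rfl
  | cons c t =>
    rw [pv_foldl_fa]
    simp [(pv_main (c :: t)).2]
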